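-- pv_equiv track=rewrite | github.com/bryan9911/adventofcode_2022 | SW/Day24/Day24.py | bliz_gen
-- ===== SOURCE A (Python) =====
-- import math
--
-- def bliz_gen(blizzard: dict, xl: int, yl: int):
--     bliz_count = math.lcm(xl-2, yl-2)
--     al_blizzard = [None]*bliz_count
--     for i in range(bliz_count):
--         cur_bliz = set()
--         for bliz, dirs in blizzard.items():
--             if dirs == '>':
--                 cur_bliz.add((bliz[0], (bliz[1] + i - 1) % (yl - 2) + 1))
--             elif dirs == '<':
--                 cur_bliz.add((bliz[0], (bliz[1] - i - 1) % (yl - 2) + 1))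
--             elif dirs == '^':
--                 cur_bliz.add(((bliz[0] - i - 1) % (xl - 2) + 1, bliz[1]))
--             elif dirs == 'v':
--                 cur_bliz.add(((bliz[0] + i - 1) % (xl - 2) + 1, bliz[1]))
--             else:
--                 cur_bliz.add(bliz)
--         al_blizzard[i] = cur_bliz
--     return al_blizzard, bliz_count
-- ===== SOURCE B (Python) =====
-- import math
--
-- def bliz_gen(blizzard: dict, xl: int, yl: int):
--     # Incremental simulation: normalize each blizzard once, then advance all
--     # blizzards one step per time tick instead of evaluating a closed-form
--     # modular formula for every (blizzard, i) pair.
--     bliz_count = math.lcm(xl - 2, yl - 2)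
--     if bliz_count == 0:
--         return [], 0
--     k, m = xl - 2, yl - 2
--     cur = []
--     for (x, y), d in blizzard.items():
--         if d == '>' or d == '<':
--             cur.append(((x, (y - 1) % m + 1), d))
--         elif d == '^' or d == 'v':
--             cur.append((((x - 1) % k + 1, y), d))
--         else:
--             cur.append(((x, y), d))
--     states = []
--     for _ in range(bliz_count):
--         states.append({p for p, _ in cur})
--         nxt = []
--         for (x, y), d in cur:
--             if d == '>':
--                 nxt.append(((x, y % m + 1), d))
--             elif d == '<':
--                 nxt.append(((x, (y - 2) % m + 1), d))
--             elif d == '^':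
--                 nxt.append((((x - 2) % k + 1, y), d))
--             elif d == 'v':
--                 nxt.append(((x % k + 1, y), d))
--             else:
--                 nxt.append(((x, y), d))
--         cur = nxt
--     return states, bliz_count
-- ===== Notes on version B (the rewrite author's own statement) =====
-- stated objective: alternative
-- what changed: B replaces A's per-step closed-form modular formula (recomputed for every blizzard at every time i) by an incremental simulation: positions are normalized once, then every state is derived from the previous one by moving each blizzard a single wrapping step.
import Mathlib
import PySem

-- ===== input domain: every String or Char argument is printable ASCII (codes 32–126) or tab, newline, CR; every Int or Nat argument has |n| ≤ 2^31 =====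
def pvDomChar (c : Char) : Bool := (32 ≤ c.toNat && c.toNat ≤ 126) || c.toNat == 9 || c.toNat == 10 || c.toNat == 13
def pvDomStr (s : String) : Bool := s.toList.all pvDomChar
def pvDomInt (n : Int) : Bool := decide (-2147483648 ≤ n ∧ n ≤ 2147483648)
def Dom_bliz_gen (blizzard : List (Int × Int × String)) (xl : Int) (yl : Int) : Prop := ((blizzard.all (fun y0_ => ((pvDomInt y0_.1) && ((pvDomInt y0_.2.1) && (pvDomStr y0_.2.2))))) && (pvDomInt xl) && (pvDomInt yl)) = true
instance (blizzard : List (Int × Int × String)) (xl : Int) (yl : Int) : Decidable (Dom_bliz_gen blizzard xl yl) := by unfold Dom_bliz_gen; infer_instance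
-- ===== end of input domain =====

-- B replaces A's closed-form modular formula per (blizzard, step) by an incremental
-- one-step simulation of all blizzards; same cost, different decomposition ("alternative").

-- shared input decoding: the dict argument arrives as an association list;
-- both Pythons receive the same already-built dict, Dict.ofList reproduces its
-- construction (duplicate keys: last value wins, first insertion position kept)
def blizDictItems (blizzard : List (Int × Int × String)) : List ((Int × Int) × String) :=
  (PySem.Dict.ofList (blizzard.map (fun b => ((b.1, b.2.1), b.2.2)))).items

-- ===== PORT A =====
def bliz_gen (blizzard : List (Int × Int × String)) (xl : Int) (yl : Int) : (List (List (Int × Int))) × Int :=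
  let bliz_count : Nat := Int.lcm (xl - 2) (yl - 2)
  let al_blizzard : List (List (Int × Int)) :=
    (List.range bliz_count).map (fun (i : Nat) =>
      (blizDictItems blizzard).foldl (fun cur_bliz bd =>
        if bd.2 = ">" then PySem.Set.add cur_bliz (bd.1.1, PySem.Int.mod (bd.1.2 + (i : Int) - 1) (yl - 2) + 1)
        else if bd.2 = "<" then PySem.Set.add cur_bliz (bd.1.1, PySem.Int.mod (bd.1.2 - (i : Int) - 1) (yl - 2) + 1)
        else if bd.2 = "^" then PySem.Set.add cur_bliz (PySem.Int.mod (bd.1.1 - (i : Int) - 1) (xl - 2) + 1, bd.1.2)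
        else if bd.2 = "v" then PySem.Set.add cur_bliz (PySem.Int.mod (bd.1.1 + (i : Int) - 1) (xl - 2) + 1, bd.1.2)
        else PySem.Set.add cur_bliz bd.1) PySem.Set.empty)
  (al_blizzard, (bliz_count : Int))

-- ===== PORT B =====
def normBliz (k m : Int) (p : (Int × Int) × String) : (Int × Int) × String :=
  if p.2 = ">" ∨ p.2 = "<" then ((p.1.1, PySem.Int.mod (p.1.2 - 1) m + 1), p.2)
  else if p.2 = "^" ∨ p.2 = "v" then ((PySem.Int.mod (p.1.1 - 1) k + 1, p.1.2), p.2)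
  else p

def stepBliz (k m : Int) (p : (Int × Int) × String) : (Int × Int) × String :=
  if p.2 = ">" then ((p.1.1, PySem.Int.mod p.1.2 m + 1), p.2)
  else if p.2 = "<" then ((p.1.1, PySem.Int.mod (p.1.2 - 2) m + 1), p.2)
  else if p.2 = "^" then ((PySem.Int.mod (p.1.1 - 2) k + 1, p.1.2), p.2)
  else if p.2 = "v" then ((PySem.Int.mod p.1.1 k + 1, p.1.2), p.2)
  else p

def genStates (k m : Int) : Nat → List ((Int × Int) × String) → List (List (Int × Int))
  | 0, _ => []
  | n + 1, cur => PySem.Set.ofList (cur.map (·.1)) :: genStates k m n (cur.map (stepBliz k m))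

def bliz_gen_alt (blizzard : List (Int × Int × String)) (xl : Int) (yl : Int) : (List (List (Int × Int))) × Int :=
  let bliz_count : Nat := Int.lcm (xl - 2) (yl - 2)
  if bliz_count = 0 then ([], 0)
  else
    (genStates (xl - 2) (yl - 2) bliz_count
       ((blizDictItems blizzard).map (normBliz (xl - 2) (yl - 2))), (bliz_count : Int))

-- ===== PRECONDITION & SPEC =====
def Spec_bliz_gen (blizzard : List (Int × Int × String)) (xl : Int) (yl : Int) (out : (List (List (Int × Int))) × Int) : Prop := out = bliz_gen_alt blizzard xl yl
instance (blizzard : List (Int × Int × String)) (xl : Int) (yl : Int) (out : (List (List (Int × Int))) × Int) : Decidable (Spec_bliz_gen blizzard xl yl out) := by unfold Spec_bliz_gen; infer_instance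

-- ===== CLAIM (what is proved, stated in full; the proofs are below) =====
def Claim_equal_bliz_gen : Prop := ∀ (blizzard : List (Int × Int × String)) (xl : Int) (yl : Int), Dom_bliz_gen blizzard xl yl → Spec_bliz_gen blizzard xl yl (bliz_gen blizzard xl yl)

-- ===== LEMMAS AND PROOFS =====

-- A's closed-form position of a blizzard at time i (proof-side characterisation of A's loop body)
def fA (xl yl : Int) (i : Int) (p : (Int × Int) × String) : Int × Int :=
  if p.2 = ">" then (p.1.1, PySem.Int.mod (p.1.2 + i - 1) (yl - 2) + 1)
  else if p.2 = "<" then (p.1.1, PySem.Int.mod (p.1.2 - i - 1) (yl - 2) + 1)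
  else if p.2 = "^" then (PySem.Int.mod (p.1.1 - i - 1) (xl - 2) + 1, p.1.2)
  else if p.2 = "v" then (PySem.Int.mod (p.1.1 + i - 1) (xl - 2) + 1, p.1.2)
  else p.1

theorem pv_mod_congr (m a b : Int) (hm : m ≠ 0) (h : m ∣ a - b) :
    PySem.Int.mod a m = PySem.Int.mod b m := by
  have ha := PySem.Int.floordiv_mul_add_mod a m
  have hb := PySem.Int.floordiv_mul_add_mod b m
  obtain ⟨u, hu⟩ := h
  have hd : PySem.Int.mod a m - PySem.Int.mod b m
      = m * (u - PySem.Int.floordiv a m + PySem.Int.floordiv b m) := by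
    linear_combination hu + ha - hb
  rcases lt_or_gt_of_ne hm with hneg | hpos
  · have h1 := PySem.Int.mod_neg_bounds (a := a) hneg
    have h2 := PySem.Int.mod_neg_bounds (a := b) hneg
    set t := u - PySem.Int.floordiv a m + PySem.Int.floordiv b m with ht
    have ht0 : t = 0 := by
      by_contra h0
      rcases (by omega : t ≤ -1 ∨ 1 ≤ t) with h3 | h3 <;> nlinarith
    rw [ht0, mul_zero] at hd; omega
  · have h1a := PySem.Int.mod_nonneg (a := a) hpos
    have h1b := PySem.Int.mod_lt (a := a) hpos
    have h2a := PySem.Int.mod_nonneg (a := b) hpos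
    have h2b := PySem.Int.mod_lt (a := b) hpos
    set t := u - PySem.Int.floordiv a m + PySem.Int.floordiv b m with ht
    have ht0 : t = 0 := by
      by_contra h0
      rcases (by omega : t ≤ -1 ∨ 1 ≤ t) with h3 | h3 <;> nlinarith
    rw [ht0, mul_zero] at hd; omega

theorem pv_mod_shift (m a c : Int) (hm : m ≠ 0) :
    PySem.Int.mod (PySem.Int.mod a m + c) m = PySem.Int.mod (a + c) m := by
  apply pv_mod_congr _ _ _ hm
  have ha := PySem.Int.floordiv_mul_add_mod a m
  exact ⟨-(PySem.Int.floordiv a m), by linear_combination ha⟩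

theorem pv_iterate_step (xl yl : Int) (hk : xl - 2 ≠ 0) (hm : yl - 2 ≠ 0)
    (p : (Int × Int) × String) (i : Nat) :
    (stepBliz (xl - 2) (yl - 2))^[i] (normBliz (xl - 2) (yl - 2) p)
      = (fA xl yl (i : Int) p, p.2) := by
  obtain ⟨⟨x, y⟩, d⟩ := p
  by_cases h1 : d = ">"
  · subst h1
    induction i with
    | zero => simp [normBliz, fA]
    | succ n ih =>
        rw [Function.iterate_succ_apply', ih]
        simp only [stepBliz, fA, String.reduceEq, reduceIte]
        rw [pv_mod_shift _ _ 1 hm]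
        push_cast; ring_nf
  · by_cases h2 : d = "<"
    · subst h2
      induction i with
      | zero => simp [normBliz, fA]
      | succ n ih =>
          rw [Function.iterate_succ_apply', ih]
          simp only [stepBliz, fA, String.reduceEq, reduceIte]
          have e : PySem.Int.mod (y - (n : Int) - 1) (yl - 2) + 1 - 2
              = PySem.Int.mod (y - (n : Int) - 1) (yl - 2) + (-1) := by ring
          rw [e, pv_mod_shift _ _ (-1) hm]
          push_cast; ring_nf
    · by_cases h3 : d = "^"
      · subst h3
        induction i with
        | zero => simp [normBliz, fA]
        | succ n ih =>
            rw [Function.iterate_succ_apply', ih]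
            simp only [stepBliz, fA, String.reduceEq, reduceIte]
            have e : PySem.Int.mod (x - (n : Int) - 1) (xl - 2) + 1 - 2
                = PySem.Int.mod (x - (n : Int) - 1) (xl - 2) + (-1) := by ring
            rw [e, pv_mod_shift _ _ (-1) hk]
            push_cast; ring_nf
      · by_cases h4 : d = "v"
        · subst h4
          induction i with
          | zero => simp [normBliz, fA]
          | succ n ih =>
              rw [Function.iterate_succ_apply', ih]
              simp only [stepBliz, fA, String.reduceEq, reduceIte]
              rw [pv_mod_shift _ _ 1 hk]
              push_cast; ring_nf
        · have hnorm : normBliz (xl - 2) (yl - 2) ((x, y), d) = ((x, y), d) := by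
            simp [normBliz, h1, h2, h3, h4]
          have hfix : stepBliz (xl - 2) (yl - 2) ((x, y), d) = ((x, y), d) := by
            simp [stepBliz, h1, h2, h3, h4]
          rw [hnorm, Function.iterate_fixed hfix]
          simp [fA, h1, h2, h3, h4]

theorem pv_fold_eq (xl yl : Int) (i : Int) (l : List ((Int × Int) × String)) :
    l.foldl (fun cur_bliz bd =>
        if bd.2 = ">" then PySem.Set.add cur_bliz (bd.1.1, PySem.Int.mod (bd.1.2 + i - 1) (yl - 2) + 1)
        else if bd.2 = "<" then PySem.Set.add cur_bliz (bd.1.1, PySem.Int.mod (bd.1.2 - i - 1) (yl - 2) + 1)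
        else if bd.2 = "^" then PySem.Set.add cur_bliz (PySem.Int.mod (bd.1.1 - i - 1) (xl - 2) + 1, bd.1.2)
        else if bd.2 = "v" then PySem.Set.add cur_bliz (PySem.Int.mod (bd.1.1 + i - 1) (xl - 2) + 1, bd.1.2)
        else PySem.Set.add cur_bliz bd.1) PySem.Set.empty
      = PySem.Set.ofList (l.map (fA xl yl i)) := by
  rw [PySem.Set.ofList_eq_foldl, List.foldl_map]
  have hf : (fun (cur_bliz : PySem.Set (Int × Int)) (bd : (Int × Int) × String) =>
        if bd.2 = ">" then PySem.Set.add cur_bliz (bd.1.1, PySem.Int.mod (bd.1.2 + i - 1) (yl - 2) + 1)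
        else if bd.2 = "<" then PySem.Set.add cur_bliz (bd.1.1, PySem.Int.mod (bd.1.2 - i - 1) (yl - 2) + 1)
        else if bd.2 = "^" then PySem.Set.add cur_bliz (PySem.Int.mod (bd.1.1 - i - 1) (xl - 2) + 1, bd.1.2)
        else if bd.2 = "v" then PySem.Set.add cur_bliz (PySem.Int.mod (bd.1.1 + i - 1) (xl - 2) + 1, bd.1.2)
        else PySem.Set.add cur_bliz bd.1)
      = (fun cur_bliz bd => PySem.Set.add cur_bliz (fA xl yl i bd)) := by
    funext cur bd
    simp only [fA]
    split_ifs <;> rfl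
  rw [hf]
  rfl

theorem pv_genStates_eq (k m : Int) (n : Nat) (cur : List ((Int × Int) × String)) :
    genStates k m n cur
      = (List.range n).map (fun i =>
          PySem.Set.ofList (cur.map (fun p => ((stepBliz k m)^[i] p).1))) := by
  induction n generalizing cur with
  | zero => simp [genStates]
  | succ n ih =>
      rw [List.range_succ_eq_map]
      simp only [genStates, ih, List.map_cons, List.map_map]
      congr 1

-- ===== VERDICT (by name: the statement is the Claim_ definition above) =====
theorem bliz_gen_spec : Claim_equal_bliz_gen := by
  intro blizzard xl yl _
  unfold Spec_bliz_gen
  show bliz_gen blizzard xl yl = bliz_gen_alt blizzard xl yl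
  by_cases hc : Int.lcm (xl - 2) (yl - 2) = 0
  · simp [bliz_gen, bliz_gen_alt, hc]
  · have hk : xl - 2 ≠ 0 := by intro h; exact hc (by simp [Int.lcm, h])
    have hm : yl - 2 ≠ 0 := by intro h; exact hc (by simp [Int.lcm, h])
    simp only [bliz_gen, bliz_gen_alt, if_neg hc]
    congr 1
    rw [pv_genStates_eq]
    apply List.map_congr_left
    intro i _
    rw [pv_fold_eq, List.map_map]
    congr 1
    apply List.map_congr_left
    intro p _
    simp only [Function.comp_apply]
    rw [pv_iterate_step xl yl hk hm]
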